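-- pv_equiv track=rewrite | github.com/EricXu-0805/opportunity-filter-engine | src/collectors/uiuc_faculty.py | _infer_skills_from_research
-- ===== SOURCE A (Python) =====
-- def _infer_skills_from_research(person: dict) -> list[str]:
--     """Infer likely required skills from research description."""
--     text = " ".join([
--         person.get("research_areas", ""),
--         person.get("research_description", ""),
--     ]).lower()
--
--     SKILL_MAP = {
--         "Python": ["python", "machine learning", "deep learning", "data science",
--                     "natural language", "computational", "bioinformatics"],
--         "C++": ["c++", "systems", "embedded", "robotics", "high performance",
--                 "parallel computing", "compilers"],
--         "MATLAB": ["matlab", "signal processing", "control", "power systems",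
--                     "circuits", "electromagnetics"],
--         "R": ["statistical", "biostatistics", "epidemiology", "ecology"],
--         "PyTorch": ["deep learning", "neural network", "computer vision",
--                      "reinforcement learning", "nlp"],
--         "TensorFlow": ["deep learning", "machine learning", "neural network"],
--         "SQL": ["database", "data management", "information systems"],
--         "Linux": ["systems", "networking", "security", "cloud"],
--         "Java": ["software engineering", "distributed", "android"],
--         "machine learning": ["machine learning", "artificial intelligence",
--                               "data science", "pattern recognition"],
--         "data analysis": ["data science", "statistics", "computational",
--                            "bioinformatics", "genomics"],
--     }
--
--     skills = set()
--     for skill, triggers in SKILL_MAP.items():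
--         if any(t in text for t in triggers):
--             skills.add(skill)
--
--     return sorted(skills)[:5]
-- ===== SOURCE B (Python) =====
-- # B: precompiled bitmask inverted index (trigger -> bitmask over the sorted skill
-- # list); one substring test per distinct trigger, OR the masks, decode the mask
-- # in sorted order. No set, no sort at runtime.
--
-- _SKILLS = ['C++', 'Java', 'Linux', 'MATLAB', 'PyTorch', 'Python', 'R', 'SQL',
--            'TensorFlow', 'data analysis', 'machine learning']
--
-- _TRIGGER_MASKS = [
--     ('android', 2), ('artificial intelligence', 1024), ('bioinformatics', 544),
--     ('biostatistics', 64), ('c++', 1), ('circuits', 8), ('cloud', 4),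
--     ('compilers', 1), ('computational', 544), ('computer vision', 16),
--     ('control', 8), ('data management', 128), ('data science', 1568),
--     ('database', 128), ('deep learning', 304), ('distributed', 2),
--     ('ecology', 64), ('electromagnetics', 8), ('embedded', 1),
--     ('epidemiology', 64), ('genomics', 512), ('high performance', 1),
--     ('information systems', 128), ('machine learning', 1312), ('matlab', 8),
--     ('natural language', 32), ('networking', 4), ('neural network', 272),
--     ('nlp', 16), ('parallel computing', 1), ('pattern recognition', 1024),
--     ('power systems', 8), ('python', 32), ('reinforcement learning', 16),
--     ('robotics', 1), ('security', 4), ('signal processing', 8),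
--     ('software engineering', 2), ('statistical', 64), ('statistics', 512),
--     ('systems', 5),
-- ]
--
--
-- def _infer_skills_from_research(person: dict) -> list[str]:
--     """Infer likely required skills from research description."""
--     text = (person.get("research_areas", "") + " "
--             + person.get("research_description", "")).lower()
--
--     mask = 0
--     for trigger, m in _TRIGGER_MASKS:
--         if trigger in text:
--             mask |= m
--
--     out = []
--     for skill in _SKILLS:
--         if mask & 1:
--             out.append(skill)
--         mask >>= 1
--     return out[:5]
-- ===== Notes on version B (the rewrite author's own statement) =====
-- stated objective: alternative
-- what changed: Replaced the skill-outer any()-scan + set + sorted()[:5] by a precompiled bitmask inverted index: one substring test per distinct trigger, OR-ing per-trigger skill bitmasks, then decoding the mask over the pre-sorted skill list, so no set and no runtime sort. Pre_ only excludes association lists repeating a read key, which do not represent a Python dict input.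
import Mathlib
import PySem

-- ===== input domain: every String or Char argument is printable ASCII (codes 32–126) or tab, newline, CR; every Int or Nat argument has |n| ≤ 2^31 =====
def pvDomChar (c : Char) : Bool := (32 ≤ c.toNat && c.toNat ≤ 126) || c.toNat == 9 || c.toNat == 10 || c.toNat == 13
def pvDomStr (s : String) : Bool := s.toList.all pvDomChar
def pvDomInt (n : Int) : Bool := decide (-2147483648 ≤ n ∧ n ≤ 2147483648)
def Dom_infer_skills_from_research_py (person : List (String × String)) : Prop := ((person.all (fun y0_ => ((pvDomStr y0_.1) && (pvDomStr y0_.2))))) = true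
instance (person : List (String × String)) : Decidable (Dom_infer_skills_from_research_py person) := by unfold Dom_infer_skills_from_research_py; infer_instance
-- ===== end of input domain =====

-- B replaces A's skill-outer any()-scan + set + sort by a precompiled bitmask inverted
-- index (one substring test per distinct trigger, OR the masks, decode in sorted skill
-- order) — objective: alternative.

-- ===== PORT A =====
-- The SKILL_MAP literal of A, in insertion order.
def pvSkillMap : List (String × List String) :=
  [("Python", ["python", "machine learning", "deep learning", "data science",
               "natural language", "computational", "bioinformatics"]),
   ("C++", ["c++", "systems", "embedded", "robotics", "high performance",
            "parallel computing", "compilers"]),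
   ("MATLAB", ["matlab", "signal processing", "control", "power systems",
               "circuits", "electromagnetics"]),
   ("R", ["statistical", "biostatistics", "epidemiology", "ecology"]),
   ("PyTorch", ["deep learning", "neural network", "computer vision",
                "reinforcement learning", "nlp"]),
   ("TensorFlow", ["deep learning", "machine learning", "neural network"]),
   ("SQL", ["database", "data management", "information systems"]),
   ("Linux", ["systems", "networking", "security", "cloud"]),
   ("Java", ["software engineering", "distributed", "android"]),
   ("machine learning", ["machine learning", "artificial intelligence",
                         "data science", "pattern recognition"]),
   ("data analysis", ["data science", "statistics", "computational",
                      "bioinformatics", "genomics"])]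

def infer_skills_from_research_py (person : List (String × String)) : List String :=
  let d := PySem.Dict.ofList person
  let text := PySem.Str.lower (PySem.Str.join " "
      [d.getD "research_areas" "", d.getD "research_description" ""])
  let skills : PySem.Set String :=
    pvSkillMap.foldl (fun acc pr =>
      if pr.2.any (fun t => PySem.Str.isIn t text) then acc.add pr.1 else acc) PySem.Set.empty
  (PySem.List.sorted skills (fun x => x)).take 5

-- ===== PORT B =====
-- B's data: the skill names in Python's sorted order, and each distinct trigger with the
-- bitmask (over that order) of the skills it triggers.
def pvSkills : List String :=
  ["C++", "Java", "Linux", "MATLAB", "PyTorch", "Python", "R", "SQL",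
   "TensorFlow", "data analysis", "machine learning"]

def pvTrigMasks : List (String × Nat) :=
  [("android", 2), ("artificial intelligence", 1024), ("bioinformatics", 544),
   ("biostatistics", 64), ("c++", 1), ("circuits", 8), ("cloud", 4),
   ("compilers", 1), ("computational", 544), ("computer vision", 16),
   ("control", 8), ("data management", 128), ("data science", 1568),
   ("database", 128), ("deep learning", 304), ("distributed", 2),
   ("ecology", 64), ("electromagnetics", 8), ("embedded", 1),
   ("epidemiology", 64), ("genomics", 512), ("high performance", 1),
   ("information systems", 128), ("machine learning", 1312), ("matlab", 8),
   ("natural language", 32), ("networking", 4), ("neural network", 272),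
   ("nlp", 16), ("parallel computing", 1), ("pattern recognition", 1024),
   ("power systems", 8), ("python", 32), ("reinforcement learning", 16),
   ("robotics", 1), ("security", 4), ("signal processing", 8),
   ("software engineering", 2), ("statistical", 64), ("statistics", 512),
   ("systems", 5)]

-- Source B's decoding loop: 'for skill in _SKILLS: if mask & 1: out.append(skill); mask >>= 1'.
def pvDecode : List String → Nat → List String
  | [], _ => []
  | s :: rest, m => if m &&& 1 == 1 then s :: pvDecode rest (m >>> 1) else pvDecode rest (m >>> 1)

-- B's port reads person.get directly off the assoc list representing the dict
-- (first-match lookup; a Python dict has unique keys, Pre_ below states that).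
def infer_skills_from_research_py_alt (person : List (String × String)) : List String :=
  let d := PySem.Dict.mk person
  let text := PySem.Str.lower
      ((d.getD "research_areas" "") ++ " " ++ (d.getD "research_description" ""))
  let mask : Nat :=
    pvTrigMasks.foldl (fun m pr => if PySem.Str.isIn pr.1 text then m ||| pr.2 else m) 0
  (pvDecode pvSkills mask).take 5

-- ===== PRECONDITION & SPEC =====
-- Pre_ excludes association lists that repeat one of the two keys the function reads:
-- a Python dict cannot contain a duplicate key, so such lists do not represent an input
-- of A (A's port collapses them Python-style, B's port reads the first binding).
def Pre_infer_skills_from_research_py (person : List (String × String)) : Prop :=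
  (person.map Prod.fst).count "research_areas" ≤ 1 ∧
  (person.map Prod.fst).count "research_description" ≤ 1
instance (person : List (String × String)) : Decidable (Pre_infer_skills_from_research_py person) := by unfold Pre_infer_skills_from_research_py; infer_instance
def pvWitness_infer_skills_from_research_py : (List (String × String)) :=
  [("research_areas", "machine learning and statistical genomics"),
   ("research_description", "deep learning for computer vision and robotics")]
def Spec_infer_skills_from_research_py (person : List (String × String)) (out : List String) : Prop := out = infer_skills_from_research_py_alt person
instance (person : List (String × String)) (out : List String) : Decidable (Spec_infer_skills_from_research_py person out) := by unfold Spec_infer_skills_from_research_py; infer_instance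

-- ===== CLAIM (what is proved, stated in full; the proofs are below) =====
def Claim_equal_infer_skills_from_research_py : Prop := ∀ (person : List (String × String)), Dom_infer_skills_from_research_py person → Pre_infer_skills_from_research_py person → Spec_infer_skills_from_research_py person (infer_skills_from_research_py person)

-- ===== LEMMAS AND PROOFS =====

-- A fold of inserts over keys different from k does not change get? k.
theorem pv_get_foldl_not_mem (l : List (String × String)) (d : PySem.Dict String String)
    (k : String) (h : ∀ p ∈ l, p.1 ≠ k) :
    (l.foldl (fun d p => d.insert p.1 p.2) d).get? k = d.get? k := by
  induction l generalizing d with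
  | nil => rfl
  | cons p t ih =>
    simp only [List.foldl_cons]
    rw [ih _ (fun q hq => h q (List.mem_cons_of_mem p hq)),
      PySem.Dict.get?_insert_of_ne _ _ (fun he => h p List.mem_cons_self he.symm)]

-- dict(pairs) lookup vs first-match lookup, generalized over the accumulator.
theorem pv_get_foldl_insert (k : String) :
    ∀ (l : List (String × String)) (d : PySem.Dict String String),
      (l.map Prod.fst).count k ≤ 1 →
      (l.foldl (fun d p => d.insert p.1 p.2) d).get? k =
        ((PySem.Dict.mk l).get? k).or (d.get? k) := by
  intro l
  induction l with
  | nil => intro d _; simp [PySem.Dict.get?]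
  | cons p t ih =>
    intro d h
    obtain ⟨a, v⟩ := p
    simp only [List.map_cons, List.count_cons] at h
    rw [List.foldl_cons, PySem.Dict.get?_mk_cons]
    by_cases hb : a = k
    · subst hb
      have ht : ∀ q ∈ t, q.1 ≠ a := by
        intro q hq he
        have : 1 ≤ (t.map Prod.fst).count a := by
          apply List.one_le_count_iff.mpr
          exact he ▸ List.mem_map_of_mem hq
        simp at h
        omega
      rw [pv_get_foldl_not_mem t _ a ht, PySem.Dict.get?_insert_self]
      simp
    · have hbeq : (a == k) = false := by simp [hb]
      rw [hbeq, if_neg (by simp)]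
      rw [ih (d.insert a v) (by simp [hbeq] at h; omega)]
      rw [PySem.Dict.get?_insert_of_ne _ _ (Ne.symm hb)]

-- On an association list without a repeated binding of k, Python's dict(pairs)
-- lookup (A's port) is the first-match lookup (B's port).
theorem pv_get_ofList (l : List (String × String)) (k : String)
    (h : (l.map Prod.fst).count k ≤ 1) :
    (PySem.Dict.ofList l).get? k = (PySem.Dict.mk l).get? k := by
  have hdef : PySem.Dict.ofList l = l.foldl (fun d p => d.insert p.1 p.2) PySem.Dict.empty := rfl
  rw [hdef, pv_get_foldl_insert k l PySem.Dict.empty h]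
  simp [PySem.Dict.get?_empty]

-- " ".join([a, b]) is a + " " + b.
theorem pv_join2 (a b : String) : PySem.Str.join " " [a, b] = a ++ " " ++ b := by
  have h : (PySem.Str.join " " [a, b]).toList = (a ++ " " ++ b).toList := by
    simp [PySem.Str.join, PySem.Chars.join, List.intercalate]
  exact String.toList_injective h

-- Membership in A's skill-accumulating fold.
theorem pv_memA (m : List (String × List String)) (f : String → Bool)
    (s : PySem.Set String) (x : String) :
    x ∈ m.foldl (fun acc pr => if pr.2.any f then acc.add pr.1 else acc) s ↔
      x ∈ s ∨ ∃ pr ∈ m, pr.2.any f = true ∧ x = pr.1 := by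
  induction m generalizing s with
  | nil => simp
  | cons hd tl ih =>
    simp only [List.foldl_cons]
    by_cases h : hd.2.any f = true
    · rw [h, if_pos rfl, ih]
      rw [List.any_eq_true] at h
      simp [PySem.Set.mem_add, h]
      tauto
    · rw [if_neg (by simpa using h), ih]
      simp only [List.any_eq_true, not_exists] at h
      simp
      tauto

-- A's fold preserves Nodup.
theorem pv_nodupA (m : List (String × List String)) (f : String → Bool)
    (s : PySem.Set String) (hs : s.Nodup) :
    (m.foldl (fun acc pr => if pr.2.any f then acc.add pr.1 else acc) s).Nodup := by
  induction m generalizing s with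
  | nil => exact hs
  | cons hd tl ih =>
    simp only [List.foldl_cons]
    by_cases h : hd.2.any f = true
    · rw [h, if_pos rfl]; exact ih _ (PySem.Set.nodup_add _ _ hs)
    · rw [if_neg (by simpa using h)]; exact ih _ hs

-- Bit i of B's mask fold: some trigger passing f carries bit i.
theorem pv_maskbit (l : List (String × Nat)) (f : String → Bool) (m0 : Nat) (i : Nat) :
    (l.foldl (fun m pr => if f pr.1 then m ||| pr.2 else m) m0).testBit i =
      (m0.testBit i || l.any (fun pr => f pr.1 && pr.2.testBit i)) := by
  induction l generalizing m0 with
  | nil => simp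
  | cons hd tl ih =>
    simp only [List.foldl_cons, List.any_cons]
    by_cases h : f hd.1 = true
    · rw [h, if_pos rfl, ih, Nat.testBit_or]
      simp [Bool.or_assoc]
    · rw [if_neg (by simpa using h), ih]
      simp [h]

-- The decoding loop is a filter, given a pointwise bit ↔ membership correspondence.
theorem pv_decode_filter (p : String → Bool) :
    ∀ (l : List String) (m : Nat),
      (∀ i (hi : i < l.length), m.testBit i = p l[i]) →
      pvDecode l m = l.filter p := by
  intro l
  induction l with
  | nil => intro m _; rfl
  | cons s rest ih =>
    intro m h
    have h0 : (m &&& 1 == 1) = p s := by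
      have hb := h 0 (by simp)
      simp only [List.getElem_cons_zero] at hb
      rw [← hb]
      by_cases hm : m % 2 = 1 <;> simp [Nat.and_one_is_mod, Nat.testBit_zero, hm]
    have hrest : pvDecode rest (m >>> 1) = rest.filter p := by
      apply ih
      intro i hi
      have hh := h (i + 1) (by simp [Nat.succ_lt_succ hi])
      simp only [List.getElem_cons_succ] at hh
      rw [Nat.testBit_shiftRight, Nat.add_comm]
      exact hh
    have hun : pvDecode (s :: rest) m =
        if m &&& 1 == 1 then s :: pvDecode rest (m >>> 1) else pvDecode rest (m >>> 1) := rfl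
    rw [hun, h0]
    cases hp : p s
    · simp [hrest, hp]
    · simp [hrest, hp]

-- Finite data facts about the literals (checked by decide below the claim block).
-- Every skill name of SKILL_MAP occurs in pvSkills.
theorem pv_skills_cover : ∀ e ∈ pvSkillMap, e.1 ∈ pvSkills := by decide
-- pvSkills is strictly increasing (Python's sorted order) and in particular Nodup.
theorem pv_skills_sorted : pvSkills.Pairwise (· < ·) := by
  have h : pvSkills.Pairwise (fun a b => a.toList < b.toList) := by decide
  exact h.imp (fun hab => String.lt_iff_toList_lt.mpr hab)
-- Bit i of a trigger's mask is set exactly when SKILL_MAP lists that trigger for skill i.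
theorem pv_mask_sound :
    ∀ i, i < 11 → ∀ pr ∈ pvTrigMasks, pr.2.testBit i = true →
      ∃ e ∈ pvSkillMap, pvSkills[i]! = e.1 ∧ pr.1 ∈ e.2 := by decide
theorem pv_mask_complete :
    ∀ i, i < 11 → ∀ e ∈ pvSkillMap, pvSkills[i]! = e.1 → ∀ t ∈ e.2,
      ∃ pr ∈ pvTrigMasks, pr.1 = t ∧ pr.2.testBit i = true := by decide

-- The heart of the equivalence, for an arbitrary trigger test p.
theorem pv_main (p : String → Bool) :
    (PySem.List.sorted (pvSkillMap.foldl (fun (acc : PySem.Set String) pr =>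
        if pr.2.any p then acc.add pr.1 else acc) PySem.Set.empty) (fun x => x)).take 5 =
    (pvDecode pvSkills (pvTrigMasks.foldl (fun (m : Nat) pr =>
        if p pr.1 then m ||| pr.2 else m) 0)).take 5 := by
  set S := pvSkillMap.foldl (fun (acc : PySem.Set String) pr =>
      if pr.2.any p then acc.add pr.1 else acc) PySem.Set.empty with hS
  set mask := pvTrigMasks.foldl (fun (m : Nat) pr => if p pr.1 then m ||| pr.2 else m) 0 with hM
  have hmemS : ∀ x, x ∈ S ↔ ∃ pr ∈ pvSkillMap, pr.2.any p = true ∧ x = pr.1 := by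
    intro x
    rw [hS, pv_memA]
    simp [PySem.Set.empty]
  have hbit : ∀ i, i < 11 → (mask.testBit i = true ↔ pvSkills[i]! ∈ S) := by
    intro i hi
    rw [hM, pv_maskbit]
    simp only [Nat.zero_testBit, Bool.false_or, List.any_eq_true, Bool.and_eq_true]
    constructor
    · rintro ⟨pr, hpr, hp, hb⟩
      obtain ⟨e, he, heq, ht⟩ := pv_mask_sound i hi pr hpr hb
      exact (hmemS _).mpr ⟨e, he, List.any_eq_true.mpr ⟨pr.1, ht, hp⟩, heq⟩
    · intro hx
      obtain ⟨e, he, hany, heq⟩ := (hmemS _).mp hx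
      obtain ⟨t, ht, hpt⟩ := List.any_eq_true.mp hany
      obtain ⟨pr, hpr, hteq, hb⟩ := pv_mask_complete i hi e he heq t ht
      exact ⟨pr, hpr, by rw [hteq]; exact hpt, hb⟩
  have hlen : pvSkills.length = 11 := by decide
  -- B's decode is the filter of pvSkills by membership in S
  have hdec : pvDecode pvSkills mask = pvSkills.filter (fun s => decide (s ∈ S)) := by
    apply pv_decode_filter
    intro i hi
    have h11 : i < 11 := by rw [hlen] at hi; exact hi
    have hgi : pvSkills[i]! = pvSkills[i] := getElem!_pos pvSkills i hi
    by_cases hx : pvSkills[i] ∈ S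
    · have hb := (hbit i h11).mpr (by rw [hgi]; exact hx)
      rw [hb]; exact (decide_eq_true hx).symm
    · have hb : mask.testBit i = false := by
        cases hcb : mask.testBit i
        · rfl
        · exact absurd (by rw [← hgi]; exact (hbit i h11).mp hcb) hx
      rw [hb]; exact (decide_eq_false hx).symm
  -- A's sorted set is the same filter
  have hsort : PySem.List.sorted S (fun x => x) = pvSkills.filter (fun s => decide (s ∈ S)) := by
    apply PySem.List.sorted_eq_of_perm_of_pairwise_lt
    · apply (List.perm_ext_iff_of_nodup ?_ ?_).mpr
      · intro x
        simp only [List.mem_filter, decide_eq_true_eq]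
        constructor
        · rintro ⟨_, hx⟩; exact hx
        · intro hx
          obtain ⟨e, he, _, heq⟩ := (hmemS _).mp hx
          exact ⟨by rw [heq]; exact pv_skills_cover e he, hx⟩
      · exact (pv_skills_sorted.imp ne_of_lt).filter _
      · exact pv_nodupA _ _ _ List.nodup_nil
    · exact pv_skills_sorted.filter _
  rw [hdec, hsort]

-- ===== VERDICT (by name: the statement is the Claim_ definition above) =====
set_option maxRecDepth 8000 in
set_option maxHeartbeats 1000000 in
theorem infer_skills_from_research_py_spec : Claim_equal_infer_skills_from_research_py := by
  intro person _ hpre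
  unfold Spec_infer_skills_from_research_py infer_skills_from_research_py infer_skills_from_research_py_alt
  have h1 := pv_get_ofList person "research_areas" hpre.1
  have h2 := pv_get_ofList person "research_description" hpre.2
  simp only [PySem.Dict.getD_eq_get?_getD, h1, h2, pv_join2]
  exact pv_main _
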